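-- pv_equiv track=rewrite | github.com/Johnnyevans32/deg-x-api | core/utils/algorithms.py | fuel_distro
-- ===== SOURCE A (Python) =====
-- def fuel_distro(fuel_arr, dist_arr):
--     # write your code in Python 3.6
--     n = len(fuel_arr)
--     trips = dict()
--     for i in range(n):
--         trips[(i, i, i)] = fuel_arr[i]
--     max_towns = 1
--     for _ in range(n):
--         new_trips = dict()
--         for k, cur_fuel in trips.items():
--             start, end, cur_town = k
--             if (
--                 start - 1 >= 0
--                 and abs(dist_arr[cur_town] - dist_arr[start - 1]) <= cur_fuel
--             ):
--                 new_start = start - 1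
--                 new_fuel = (
--                     cur_fuel
--                     - abs(dist_arr[cur_town] - dist_arr[start - 1])
--                     + fuel_arr[new_start]
--                 )
--                 new_key = (new_start, end, new_start)
--                 if new_key not in new_trips:
--                     max_towns = max(max_towns, end - new_start + 1)
--                     new_trips[new_key] = new_fuel
--                 else:
--                     new_trips[new_key] = max(new_trips[new_key], new_fuel)
--             if end + 1 < n and abs(dist_arr[end + 1] - dist_arr[cur_town]) <= cur_fuel:
--                 new_end = end + 1
--                 new_key = (start, new_end, new_end)
--                 new_fuel = (
--                     cur_fuel
--                     - abs(dist_arr[new_end] - dist_arr[cur_town])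
--                     + fuel_arr[new_end]
--                 )
--                 if new_key not in new_trips:
--                     max_towns = max(max_towns, new_end - start + 1)
--                     new_trips[new_key] = new_fuel
--                 else:
--                     new_trips[new_key] = max(new_trips[new_key], new_fuel)
--         trips = new_trips
--     return max_towns
-- ===== SOURCE B (Python) =====
-- def _step(fuel_arr, dist_arr, state, tl, tr, tgt):
--     # best arrival fuel at town tgt, leaving a covered block whose state is
--     # (fuel at left end tl, fuel at right end tr); None = unreachable
--     out = None
--     for fuel, town in ((state[0], tl), (state[1], tr)):
--         if fuel is not None and abs(dist_arr[town] - dist_arr[tgt]) <= fuel: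
--             got = fuel - abs(dist_arr[town] - dist_arr[tgt]) + fuel_arr[tgt]
--             if out is None or got > out:
--                 out = got
--     return out
--
--
-- def fuel_distro(fuel_arr, dist_arr):
--     # Sweep the right endpoint e left to right; seg[k] is the state of block
--     # [e-k, e].  Any reachable block of length L forces a reachable block of
--     # length L-1 with endpoint no further right, so blocks longer than best+2
--     # are unreachable and the inner descent can stop there: only the live
--     # window of each column is ever computed.
--     n = len(fuel_arr)
--     best = 1
--     seg = []
--     for e in range(n):
--         prev = seg  # states of blocks ending at e - 1
--         seg = [(fuel_arr[e], fuel_arr[e])]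
--         s = e - 1
--         while s >= 0 and e - s <= best + 1:
--             right = seg[-1]  # block [s+1, e]
--             below = prev[e - 1 - s] if e - 1 - s < len(prev) else (None, None)  # block [s, e-1]
--             cell = (_step(fuel_arr, dist_arr, right, s + 1, e, s),
--                     _step(fuel_arr, dist_arr, below, s, e - 1, e))
--             seg.append(cell)
--             if cell != (None, None):
--                 best = max(best, e - s + 1)
--             s -= 1
--     return best
-- ===== Notes on version B (the rewrite author's own statement) =====
-- stated objective: alternative
-- what changed: Replaces A's layer-by-layer BFS that rebuilds a dict of (start,end,town) states once per round with a single left-to-right sweep of the block's right endpoint that keeps only the live window of column states in a short list, pruning every block longer than best+2 by the downward-closure of reachable lengths.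
import Mathlib
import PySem

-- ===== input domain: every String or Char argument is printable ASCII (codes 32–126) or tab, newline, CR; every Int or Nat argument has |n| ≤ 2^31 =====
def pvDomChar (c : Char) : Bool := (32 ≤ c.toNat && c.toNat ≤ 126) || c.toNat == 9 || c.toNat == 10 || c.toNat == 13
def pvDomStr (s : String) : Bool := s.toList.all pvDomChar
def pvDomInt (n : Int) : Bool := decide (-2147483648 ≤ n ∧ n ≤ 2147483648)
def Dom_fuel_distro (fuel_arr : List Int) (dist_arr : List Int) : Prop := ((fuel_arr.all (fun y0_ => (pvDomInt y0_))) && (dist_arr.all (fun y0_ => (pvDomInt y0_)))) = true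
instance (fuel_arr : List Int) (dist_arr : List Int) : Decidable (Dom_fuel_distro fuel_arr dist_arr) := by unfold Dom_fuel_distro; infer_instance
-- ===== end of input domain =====

-- B replaces A's round-by-round dict BFS over (start,end,town) states by a single left-to-right
-- sweep of the block's right endpoint keeping only the live window of column states in a list,
-- pruning blocks longer than best+2 via downward-closure of reachable lengths: an alternative
-- algorithm of similar cost.


-- ===== PORT A =====
-- xs[i] (indices stay in range on Pre_-admitted inputs; default never read there)
def pvIdx (xs : List Int) (i : Int) : Int := PySem.List.pyGetD xs i 0

-- body of A's inner `for k, cur_fuel in trips.items()` loop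
def pvA_step (fuel_arr dist_arr : List Int) (n : Int)
    (acc : Int × PySem.Dict (Int × Int × Int) Int)
    (kv : (Int × Int × Int) × Int) : Int × PySem.Dict (Int × Int × Int) Int :=
  let start := kv.1.1
  let end_ := kv.1.2.1
  let cur_town := kv.1.2.2
  let cur_fuel := kv.2
  let acc1 :=
    if start - 1 ≥ 0 ∧ |pvIdx dist_arr cur_town - pvIdx dist_arr (start - 1)| ≤ cur_fuel then
      let new_start := start - 1
      let new_fuel := cur_fuel - |pvIdx dist_arr cur_town - pvIdx dist_arr (start - 1)| + pvIdx fuel_arr new_start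
      let new_key := (new_start, end_, new_start)
      match acc.2.get? new_key with
      | none => (max acc.1 (end_ - new_start + 1), acc.2.insert new_key new_fuel)
      | some w => (acc.1, acc.2.insert new_key (max w new_fuel))
    else acc
  if end_ + 1 < n ∧ |pvIdx dist_arr (end_ + 1) - pvIdx dist_arr cur_town| ≤ cur_fuel then
    let new_end := end_ + 1
    let new_key := (start, new_end, new_end)
    let new_fuel := cur_fuel - |pvIdx dist_arr new_end - pvIdx dist_arr cur_town| + pvIdx fuel_arr new_end
    match acc1.2.get? new_key with
    | none => (max acc1.1 (new_end - start + 1), acc1.2.insert new_key new_fuel)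
    | some w => (acc1.1, acc1.2.insert new_key (max w new_fuel))
  else acc1

-- one `for _ in range(n)` round: rebuild new_trips from trips
def pvA_round (fuel_arr dist_arr : List Int) (n : Int)
    (st : Int × PySem.Dict (Int × Int × Int) Int) : Int × PySem.Dict (Int × Int × Int) Int :=
  st.2.items.foldl (pvA_step fuel_arr dist_arr n) (st.1, PySem.Dict.empty)

def fuel_distro (fuel_arr : List Int) (dist_arr : List Int) : Int :=
  let n : Int := fuel_arr.length
  let trips := (PySem.List.pyRange 0 n 1).foldl
      (fun d i => d.insert (i, i, i) (pvIdx fuel_arr i)) PySem.Dict.empty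
  ((PySem.List.pyRange 0 n 1).foldl (fun st _ => pvA_round fuel_arr dist_arr n st) (1, trips)).1

-- ===== PORT B =====
-- Source B's _step helper: best arrival fuel at town tgt from a block state (fuel at tl, fuel at tr)
def pvStepB (f d : List Int) (state : Option Int × Option Int) (tl tr tgt : Int) : Option Int :=
  [(state.1, tl), (state.2, tr)].foldl (fun out src =>
    match src.1 with
    | none => out
    | some fuel =>
      if |pvIdx d src.2 - pvIdx d tgt| ≤ fuel then
        let got := fuel - |pvIdx d src.2 - pvIdx d tgt| + pvIdx f tgt
        match out with
        | none => some got
        | some b => if got > b then some got else some b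
      else out) none

-- Source B's inner `while s >= 0 and e - s <= best + 1` descent for one right endpoint e
def pvInner (f d : List Int) (e : Int) (best : Int)
    (seg prev : List (Option Int × Option Int)) (s : Int) :
    Int × List (Option Int × Option Int) :=
  if h : 0 ≤ s ∧ e - s ≤ best + 1 then
    let right := PySem.List.pyGetD seg (-1) (none, none)
    let below := if e - 1 - s < (prev.length : Int) then
        PySem.List.pyGetD prev (e - 1 - s) (none, none) else (none, none)
    let cell := (pvStepB f d right (s + 1) e s, pvStepB f d below s (e - 1) e)
    let best' := if cell ≠ ((none : Option Int), (none : Option Int)) then max best (e - s + 1) else best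
    pvInner f d e best' (seg ++ [cell]) prev (s - 1)
  else (best, seg)
termination_by (s + 1).toNat
decreasing_by omega

def fuel_distro_alt (fuel_arr : List Int) (dist_arr : List Int) : Int :=
  let n : Int := fuel_arr.length
  ((PySem.List.pyRange 0 n 1).foldl (fun st e =>
      pvInner fuel_arr dist_arr e st.1
        [(some (pvIdx fuel_arr e), some (pvIdx fuel_arr e))] st.2 (e - 1))
    (1, [])).1

-- ===== PRECONDITION & SPEC =====
-- Pre_ excludes exactly the inputs where the Python A raises IndexError: with at least two
-- towns, every index 0..len(fuel_arr)-1 of dist_arr is read, so dist_arr must be at least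
-- as long as fuel_arr (on such inputs B raises IndexError as well).
def Pre_fuel_distro (fuel_arr : List Int) (dist_arr : List Int) : Prop :=
  2 ≤ fuel_arr.length → fuel_arr.length ≤ dist_arr.length
instance (fuel_arr : List Int) (dist_arr : List Int) : Decidable (Pre_fuel_distro fuel_arr dist_arr) := by
  unfold Pre_fuel_distro; infer_instance

def pvWitness_fuel_distro : List Int × List Int := ([3, 1, 2], [0, 2, 3])

def Spec_fuel_distro (fuel_arr : List Int) (dist_arr : List Int) (out : Int) : Prop := out = fuel_distro_alt fuel_arr dist_arr
instance (fuel_arr : List Int) (dist_arr : List Int) (out : Int) : Decidable (Spec_fuel_distro fuel_arr dist_arr out) := by unfold Spec_fuel_distro; infer_instance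

-- ===== CLAIM (what is proved, stated in full; the proofs are below) =====
def Claim_equal_fuel_distro : Prop := ∀ (fuel_arr : List Int) (dist_arr : List Int), Dom_fuel_distro fuel_arr dist_arr → Pre_fuel_distro fuel_arr dist_arr → Spec_fuel_distro fuel_arr dist_arr (fuel_distro fuel_arr dist_arr)

-- ===== LEMMAS AND PROOFS =====

-- best fuel after a step to town tgt from source with fuel `src` standing at town t (none = infeasible)
def pvCand (f d : List Int) (src : Option Int) (t tgt : Int) : Option Int :=
  match src with
  | none => none
  | some v => if |pvIdx d t - pvIdx d tgt| ≤ v then some (v - |pvIdx d t - pvIdx d tgt| + pvIdx f tgt) else none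

def pvOptMax : Option Int → Option Int → Option Int
  | none, o => o
  | some a, none => some a
  | some a, some b => some (max a b)

-- spec value of the (left-end, right-end) state of block [s, s+r]
def pvG (f d : List Int) : Nat → Int → Option Int × Option Int
  | 0, s => (some (pvIdx f s), some (pvIdx f s))
  | r + 1, s =>
    (pvOptMax (pvCand f d (pvG f d r (s + 1)).1 (s + 1) s)
              (pvCand f d (pvG f d r (s + 1)).2 (s + 1 + (r : Int)) s),
     pvOptMax (pvCand f d (pvG f d r s).1 s (s + (r : Int) + 1))
              (pvCand f d (pvG f d r s).2 (s + (r : Int)) (s + (r : Int) + 1)))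

-- the (key, fuel) contributions one item of `trips` makes to `new_trips`
def pvContribs (f d : List Int) (n : Int) (p : (Int × Int × Int) × Int) : List ((Int × Int × Int) × Int) :=
  (if p.1.1 - 1 ≥ 0 ∧ |pvIdx d p.1.2.2 - pvIdx d (p.1.1 - 1)| ≤ p.2
   then [((p.1.1 - 1, p.1.2.1, p.1.1 - 1),
          p.2 - |pvIdx d p.1.2.2 - pvIdx d (p.1.1 - 1)| + pvIdx f (p.1.1 - 1))]
   else []) ++
  (if p.1.2.1 + 1 < n ∧ |pvIdx d (p.1.2.1 + 1) - pvIdx d p.1.2.2| ≤ p.2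
   then [((p.1.1, p.1.2.1 + 1, p.1.2.1 + 1),
          p.2 - |pvIdx d (p.1.2.1 + 1) - pvIdx d p.1.2.2| + pvIdx f (p.1.2.1 + 1))]
   else [])

-- all contributions of a list of items to the key k
def pvCTo (f d : List Int) (n : Int) (l : List ((Int × Int × Int) × Int)) (k : Int × Int × Int) : List Int :=
  (l.flatMap (pvContribs f d n)).filterMap (fun q => if q.1 = k then some q.2 else none)

def pvMerge (o : Option Int) (cs : List Int) : Option Int :=
  cs.foldl (fun o c => match o with | none => some c | some w => some (max w c)) o

-- invariant tying A's dict after r rounds to the spec rows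
def pvMatch (f d : List Int) (n : Int) (r : Nat) (D : PySem.Dict (Int × Int × Int) Int) : Prop :=
  D.keys.Nodup ∧
  (∀ p ∈ D.items, ∃ s : Int, 0 ≤ s ∧ s + (r : Int) < n ∧
      (p.1 = (s, s + (r : Int), s) ∨ p.1 = (s, s + (r : Int), s + (r : Int)))) ∧
  (∀ s : Int, 0 ≤ s → s + (r : Int) < n →
      D.get? (s, s + (r : Int), s) = (pvG f d r s).1 ∧
      D.get? (s, s + (r : Int), s + (r : Int)) = (pvG f d r s).2)

def pvAlive (f d : List Int) (n : Int) (r : Nat) : Bool :=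
  (PySem.List.pyRange 0 (n - (r : Int)) 1).any (fun s => (pvG f d r s).1.isSome || (pvG f d r s).2.isSome)

def pvMtB (f d : List Int) (n : Int) : Nat → Int
  | 0 => 1
  | k + 1 => if pvAlive f d n (k + 1) then ((k : Int) + 2) else pvMtB f d n k

lemma pvOptMax_none_right (o : Option Int) : pvOptMax o none = o := by cases o <;> rfl

lemma pvOptMax_comm (a b : Option Int) : pvOptMax a b = pvOptMax b a := by
  cases a <;> cases b <;> simp [pvOptMax, max_comm]

lemma pvOptMax_assoc (a b c : Option Int) : pvOptMax (pvOptMax a b) c = pvOptMax a (pvOptMax b c) := by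
  cases a <;> cases b <;> cases c <;> simp [pvOptMax, max_assoc]

lemma pvMerge_append (o : Option Int) (a b : List Int) :
    pvMerge o (a ++ b) = pvMerge (pvMerge o a) b := by
  simp [pvMerge, List.foldl_append]

lemma pvMerge_eq_optMax (o : Option Int) (cs : List Int) :
    pvMerge o cs = pvOptMax o (pvMerge none cs) := by
  induction cs generalizing o with
  | nil => simp [pvMerge, pvOptMax_none_right]
  | cons c cs ih =>
    have h1 := ih (o := match o with | none => some c | some w => some (max w c))
    have h2 := ih (o := some c)
    simp only [pvMerge] at h1 h2 ⊢
    rw [List.foldl_cons, List.foldl_cons, h1, h2]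
    cases o with
    | none => rfl
    | some w =>
      show pvOptMax (pvOptMax (some w) (some c)) _ = pvOptMax (some w) (pvOptMax (some c) _)
      rw [pvOptMax_assoc]

lemma pvMerge_toList (o : Option Int) : pvMerge none o.toList = o := by
  cases o <;> rfl

lemma pvMerge_isSome (o : Option Int) (cs : List Int) :
    (pvMerge o cs).isSome = (o.isSome || !cs.isEmpty) := by
  induction cs generalizing o with
  | nil => cases o <;> simp [pvMerge]
  | cons c cs ih =>
    simp only [pvMerge, List.foldl_cons] at ih ⊢
    cases o with
    | none => rw [ih]; simp
    | some w => rw [ih]; simp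

lemma pvMerge_isNone (o : Option Int) (cs : List Int) :
    (pvMerge o cs).isNone = (o.isNone && cs.isEmpty) := by
  have h := pvMerge_isSome o cs
  cases hx : pvMerge o cs <;> rw [hx] at h <;> cases o <;> cases cs <;> simp_all

lemma pvAny_congr {α : Type} (l : List α) (p q : α → Bool) (h : ∀ x ∈ l, p x = q x) :
    l.any p = l.any q := by
  induction l with
  | nil => rfl
  | cons x xs ih =>
    simp only [List.any_cons, h x (by simp), ih (fun y hy => h y (by simp [hy]))]

lemma pvCTo_cons (f d : List Int) (n : Int) (p : (Int × Int × Int) × Int)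
    (l : List ((Int × Int × Int) × Int)) (k : Int × Int × Int) :
    pvCTo f d n (p :: l) k = pvCTo f d n [p] k ++ pvCTo f d n l k := by
  simp [pvCTo]

-- single-step dict lemma: one item's processing merges its contributions per key
lemma pvStep_get (f d : List Int) (n : Int) (p : (Int × Int × Int) × Int) (mt : Int)
    (D : PySem.Dict (Int × Int × Int) Int) (k : Int × Int × Int) :
    (pvA_step f d n (mt, D) p).2.get? k = pvMerge (D.get? k) (pvCTo f d n [p] k) := by
  obtain ⟨⟨s, e, t⟩, v⟩ := p
  have hne2 : ((s, e + 1, e + 1) : Int × Int × Int) ≠ (s - 1, e, s - 1) := by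
    intro h; injection h with h1 _; omega
  dsimp only [pvA_step, pvContribs, pvCTo]
  by_cases hL : s - 1 ≥ 0 ∧ |pvIdx d t - pvIdx d (s - 1)| ≤ v <;>
    by_cases hR : e + 1 < n ∧ |pvIdx d (e + 1) - pvIdx d t| ≤ v
  · rw [if_pos hL, if_pos hR]
    cases hgL : D.get? (s - 1, e, s - 1) <;> cases hgR : D.get? (s, e + 1, e + 1) <;>
      · simp only [hgL, PySem.Dict.get?_insert (κ := Int × Int × Int), if_neg hne2, hgR]
        simp only [List.flatMap_cons, List.flatMap_nil, List.append_nil, List.filterMap_append,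
          List.filterMap_cons, List.filterMap_nil]
        by_cases h1 : k = (s - 1, e, s - 1) <;> by_cases h2 : k = (s, e + 1, e + 1)
        · exact absurd (h2.symm.trans h1) hne2
        · simp [pvMerge, pvContribs, hL, hR, h1, h2, hgL, hgR, hne2, Ne.symm hne2, show (1:Int) ≤ s from by omega]
        · simp [pvMerge, pvContribs, hL, hR, h1, h2, hgL, hgR, hne2, Ne.symm hne2, show (1:Int) ≤ s from by omega,
            show ((s - 1, e, s - 1) : Int × Int × Int) ≠ k from fun h => h1 h.symm]
        · simp [pvMerge, pvContribs, hL, hR, h1, h2, show (1:Int) ≤ s from by omega,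
            show ((s - 1, e, s - 1) : Int × Int × Int) ≠ k from fun h => h1 h.symm,
            show ((s, e + 1, e + 1) : Int × Int × Int) ≠ k from fun h => h2 h.symm]
  · rw [if_pos hL, if_neg hR]
    cases hgL : D.get? (s - 1, e, s - 1) <;>
      · simp only [hgL, PySem.Dict.get?_insert (κ := Int × Int × Int)]
        simp only [List.flatMap_cons, List.flatMap_nil, List.append_nil, List.filterMap_append,
          List.filterMap_cons, List.filterMap_nil]
        by_cases h1 : k = (s - 1, e, s - 1)
        · simp [pvMerge, pvContribs, hL, hR, h1, hgL, show (1:Int) ≤ s from by omega]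
        · simp [pvMerge, pvContribs, hL, hR, h1, show (1:Int) ≤ s from by omega,
            show ((s - 1, e, s - 1) : Int × Int × Int) ≠ k from fun h => h1 h.symm]
  · rw [if_neg hL, if_pos hR]
    cases hgR : D.get? (s, e + 1, e + 1) <;>
      · simp only [hgR, PySem.Dict.get?_insert (κ := Int × Int × Int)]
        simp only [List.flatMap_cons, List.flatMap_nil, List.append_nil, List.filterMap_append,
          List.filterMap_cons, List.filterMap_nil, List.nil_append]
        by_cases h2 : k = (s, e + 1, e + 1)
        · simp [pvMerge, pvContribs, hL, hR, h2, hgR, show ¬((1:Int) ≤ s ∧ |pvIdx d t - pvIdx d (s - 1)| ≤ v) from fun h => hL ⟨by omega, h.2⟩]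
        · simp [pvMerge, pvContribs, hL, hR, h2, show ¬((1:Int) ≤ s ∧ |pvIdx d t - pvIdx d (s - 1)| ≤ v) from fun h => hL ⟨by omega, h.2⟩,
            show ((s, e + 1, e + 1) : Int × Int × Int) ≠ k from fun h => h2 h.symm]
  · rw [if_neg hL, if_neg hR]
    simp [pvMerge, pvContribs, hL, hR, show ¬((1:Int) ≤ s ∧ |pvIdx d t - pvIdx d (s - 1)| ≤ v) from fun h => hL ⟨by omega, h.2⟩]

lemma pvStep_nodup (f d : List Int) (n : Int) (p : (Int × Int × Int) × Int)
    (acc : Int × PySem.Dict (Int × Int × Int) Int) (h : acc.2.keys.Nodup) :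
    (pvA_step f d n acc p).2.keys.Nodup := by
  rcases acc with ⟨mt, D⟩
  dsimp only [pvA_step]
  split_ifs
  all_goals repeat' split
  all_goals simp_all [PySem.Dict.nodup_keys_insert]

lemma pvStep_mt (f d : List Int) (n : Int) (p : (Int × Int × Int) × Int) (mt : Int)
    (D : PySem.Dict (Int × Int × Int) Int) (r : Nat)
    (hsh : ∃ s : Int, p.1 = (s, s + (r : Int), s) ∨ p.1 = (s, s + (r : Int), s + (r : Int))) :
    (pvA_step f d n (mt, D) p).1 =
      if (pvContribs f d n p).any (fun q => (D.get? q.1).isNone) then max mt ((r : Int) + 2) else mt := by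
  obtain ⟨⟨s, e, t⟩, v⟩ := p
  obtain ⟨s0, hsh⟩ := hsh
  have hE : e = s + (r : Int) := by
    rcases hsh with h | h <;> (simp only [Prod.mk.injEq] at h; omega)
  subst hE
  have hne2 : ((s, s + (r : Int) + 1, s + (r : Int) + 1) : Int × Int × Int) ≠ (s - 1, s + (r : Int), s - 1) := by
    intro h; injection h with h1 _; omega
  have c1 : s + (r : Int) - (s - 1) + 1 = (r : Int) + 2 := by omega
  have c2 : s + (r : Int) + 1 - s + 1 = (r : Int) + 2 := by omega
  dsimp only [pvA_step, pvContribs]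
  by_cases hL : s - 1 ≥ 0 ∧ |pvIdx d t - pvIdx d (s - 1)| ≤ v <;>
    by_cases hR : s + (r : Int) + 1 < n ∧ |pvIdx d (s + (r : Int) + 1) - pvIdx d t| ≤ v
  · rw [if_pos hL, if_pos hR]
    cases hgL : D.get? (s - 1, s + (r : Int), s - 1) <;>
      cases hgR : D.get? (s, s + (r : Int) + 1, s + (r : Int) + 1) <;>
      · simp only [hgL, PySem.Dict.get?_insert (κ := Int × Int × Int), if_neg hne2, hgR]
        simp [hL, hR, hgL, hgR, c1, c2, show (1:Int) ≤ s from by omega, max_assoc, max_self,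
          show (r:Int)+1+1 = (r:Int)+2 from by omega]
  · rw [if_pos hL, if_neg hR]
    cases hgL : D.get? (s - 1, s + (r : Int), s - 1) <;>
      · simp only [hgL]
        simp [hL, hR, hgL, c1, show (1:Int) ≤ s from by omega, show (r:Int)+1+1 = (r:Int)+2 from by omega]
  · rw [if_neg hL, if_pos hR]
    cases hgR : D.get? (s, s + (r : Int) + 1, s + (r : Int) + 1) <;>
      · simp only [hgR]
        simp [hR, hgR, c2, show (r:Int)+1+1 = (r:Int)+2 from by omega,
          show ¬((1:Int) ≤ s ∧ |pvIdx d t - pvIdx d (s - 1)| ≤ v) from fun h => hL ⟨by omega, h.2⟩]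
  · rw [if_neg hL, if_neg hR]
    simp [hR,
      show ¬((1:Int) ≤ s ∧ |pvIdx d t - pvIdx d (s - 1)| ≤ v) from fun h => hL ⟨by omega, h.2⟩]

-- fold of pvA_step: dict lookups merge all contributions
lemma pvFold_get (f d : List Int) (n : Int) (l : List ((Int × Int × Int) × Int)) :
    ∀ (mt : Int) (D : PySem.Dict (Int × Int × Int) Int) (k : Int × Int × Int),
    ((l.foldl (pvA_step f d n) (mt, D)).2).get? k = pvMerge (D.get? k) (pvCTo f d n l k) := by
  induction l with
  | nil => intro mt D k; simp [pvCTo, pvMerge]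
  | cons p tl ih =>
    intro mt D k
    rw [List.foldl_cons]
    have h1 := ih (pvA_step f d n (mt, D) p).1 (pvA_step f d n (mt, D) p).2 k
    rw [Prod.mk.eta] at h1
    rw [h1, pvStep_get]
    conv_rhs => rw [pvCTo_cons f d n p tl k]
    rw [pvMerge_append]

lemma pvFold_nodup (f d : List Int) (n : Int) (l : List ((Int × Int × Int) × Int))
    (mt : Int) (D : PySem.Dict (Int × Int × Int) Int) (h : D.keys.Nodup) :
    ((l.foldl (pvA_step f d n) (mt, D)).2).keys.Nodup := by
  induction l generalizing mt D with
  | nil => exact h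
  | cons p tl ih =>
    rw [List.foldl_cons]
    have h1 := pvStep_nodup f d n p (mt, D) h
    have := ih (pvA_step f d n (mt, D) p).1 (pvA_step f d n (mt, D) p).2 h1
    rwa [Prod.mk.eta] at this

-- fold of pvA_step: max_towns bumps to r+2 iff some contribution hits a fresh key
lemma pvFold_mt (f d : List Int) (n : Int) (r : Nat) (l : List ((Int × Int × Int) × Int))
    (hsh : ∀ p ∈ l, ∃ s : Int, p.1 = (s, s + (r : Int), s) ∨ p.1 = (s, s + (r : Int), s + (r : Int))) :
    ∀ (mt : Int) (D : PySem.Dict (Int × Int × Int) Int),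
    (l.foldl (pvA_step f d n) (mt, D)).1 =
      if (l.flatMap (pvContribs f d n)).any (fun q => (D.get? q.1).isNone) then max mt ((r : Int) + 2) else mt := by
  induction l with
  | nil => intro mt D; simp
  | cons p tl ih =>
    intro mt D
    have hp := hsh p (List.mem_cons_self)
    have htl := fun q hq => hsh q (List.mem_cons_of_mem p hq)
    rw [List.foldl_cons]
    have h1 := ih htl (pvA_step f d n (mt, D) p).1 (pvA_step f d n (mt, D) p).2
    rw [Prod.mk.eta] at h1
    rw [h1, pvStep_mt f d n p mt D r hp]
    have hctoform : ∀ x : Int × Int × Int, pvCTo f d n [p] x =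
        (pvContribs f d n p).filterMap (fun q => if q.1 = x then some q.2 else none) := by
      intro x; simp [pvCTo]
    by_cases hcond : (pvContribs f d n p).any (fun q => (D.get? q.1).isNone)
    · simp only [hcond, if_true]
      have : (p :: tl).flatMap (pvContribs f d n) = pvContribs f d n p ++ tl.flatMap (pvContribs f d n) := by
        simp
      rw [this, List.any_append]
      have hcondtrue : (pvContribs f d n p).any (fun q => (D.get? q.1).isNone) = true := hcond
      rw [hcondtrue]
      simp only [Bool.true_or, if_true]
      split <;> [rw [max_assoc, max_self]; rfl]
    · simp only [hcond, if_false]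
      have hpt : ∀ q ∈ pvContribs f d n p, (D.get? q.1).isNone = false := by
        intro q hq
        cases hD : (D.get? q.1).isNone
        · rfl
        · exact absurd (List.any_eq_true.mpr ⟨q, hq, by rw [hD]⟩) hcond
      have hkey : ∀ x : Int × Int × Int, (D.get? x).isNone = true → pvCTo f d n [p] x = [] := by
        intro x hx
        rw [hctoform]
        rw [List.filterMap_eq_nil_iff]
        intro a ha
        by_cases hax : a.1 = x
        · exfalso
          have := hpt a ha
          rw [hax] at this
          rw [this] at hx
          exact absurd hx (by simp)
        · simp [hax]
      have hpointwise : ∀ q ∈ tl.flatMap (pvContribs f d n),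
          ((pvA_step f d n (mt, D) p).2.get? q.1).isNone = (D.get? q.1).isNone := by
        intro q _
        rw [pvStep_get, pvMerge_isNone]
        cases hD : (D.get? q.1).isNone
        · simp
        · rw [hkey q.1 hD]
          simp
      rw [pvAny_congr _ _ _ hpointwise]
      have : (p :: tl).flatMap (pvContribs f d n) = pvContribs f d n p ++ tl.flatMap (pvContribs f d n) := by
        simp
      rw [this, List.any_append]
      have hcondfalse : (pvContribs f d n p).any (fun q => (D.get? q.1).isNone) = false := by
        simpa using hcond
      rw [hcondfalse, Bool.false_or]
      simp

lemma pvMerge_none_append (a b : List Int) :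
    pvMerge none (a ++ b) = pvOptMax (pvMerge none a) (pvMerge none b) := by
  rw [pvMerge_append, pvMerge_eq_optMax]

-- merging the contributions of a nodup-key item list that can only hit two keys
lemma pvMerge_two (f d : List Int) (n : Int) (k κ1 κ2 : Int × Int × Int) (c : (Int × Int × Int) → Int → Option Int) :
    ∀ (l : List ((Int × Int × Int) × Int)) (g1 g2 : Option Int),
    (l.map Prod.fst).Nodup →
    (∀ p ∈ l, pvCTo f d n [p] k = if p.1 = κ1 ∨ p.1 = κ2 then (c p.1 p.2).toList else []) →
    (∀ v, (κ1, v) ∈ l → c κ1 v = g1) → (κ1 ∉ l.map Prod.fst → g1 = none) →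
    (∀ v, (κ2, v) ∈ l → c κ2 v = g2) → (κ2 ∉ l.map Prod.fst → g2 = none) →
    (κ1 = κ2 → g1 = g2) →
    pvMerge none (pvCTo f d n l k) = pvOptMax g1 g2 := by
  intro l
  induction l with
  | nil =>
    intro g1 g2 hnd hper h1 h1n h2 h2n hcase
    have e1 : g1 = none := h1n (by simp)
    have e2 : g2 = none := h2n (by simp)
    simp [pvCTo, e1, e2, pvOptMax, pvMerge]
  | cons p tl ih =>
    intro g1 g2 hnd hper h1 h1n h2 h2n hcase
    rw [List.map_cons, List.nodup_cons] at hnd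
    rw [pvCTo_cons, pvMerge_none_append]
    have hmemtl1 : ∀ v, (κ1, v) ∈ tl → (κ1, v) ∈ p :: tl := fun v hv => List.mem_cons_of_mem p hv
    have hmemtl2 : ∀ v, (κ2, v) ∈ tl → (κ2, v) ∈ p :: tl := fun v hv => List.mem_cons_of_mem p hv
    by_cases hp1 : p.1 = κ1
    · have hhead : pvMerge none (pvCTo f d n [p] k) = g1 := by
        rw [hper p (List.mem_cons_self), if_pos (Or.inl hp1), hp1, pvMerge_toList]
        exact h1 p.2 (by rw [← hp1]; exact (Prod.mk.eta ▸ List.mem_cons_self))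
      rw [hhead]
      have hnotintl : κ1 ∉ tl.map Prod.fst := by rw [← hp1]; exact hnd.1
      by_cases hk : κ1 = κ2
      · have htlres := ih none none hnd.2
          (fun q hq => hper q (List.mem_cons_of_mem p hq))
          (fun v hv => absurd (List.mem_map_of_mem (f := Prod.fst) hv) hnotintl)
          (fun _ => rfl)
          (fun v hv => absurd (List.mem_map_of_mem (f := Prod.fst) hv) (hk ▸ hnotintl))
          (fun _ => rfl) (fun _ => rfl)
        rw [htlres, hcase hk]
        cases g2 <;> simp [pvOptMax]
      · have htlres := ih none g2 hnd.2
          (fun q hq => hper q (List.mem_cons_of_mem p hq))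
          (fun v hv => absurd (List.mem_map_of_mem (f := Prod.fst) hv) hnotintl)
          (fun _ => rfl)
          (fun v hv => h2 v (hmemtl2 v hv))
          (fun hnm => h2n (by
            simp only [List.map_cons, List.mem_cons]
            rintro (h | h)
            · exact hk (hp1 ▸ h.symm)
            · exact hnm h))
          (fun hq => absurd hq hk)
        rw [htlres]
        rfl
    · by_cases hp2 : p.1 = κ2
      · have hhead : pvMerge none (pvCTo f d n [p] k) = g2 := by
          rw [hper p (List.mem_cons_self), if_pos (Or.inr hp2), hp2, pvMerge_toList]
          exact h2 p.2 (by rw [← hp2]; exact (Prod.mk.eta ▸ List.mem_cons_self))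
        rw [hhead]
        have hnotintl : κ2 ∉ tl.map Prod.fst := by rw [← hp2]; exact hnd.1
        have htlres := ih g1 none hnd.2
          (fun q hq => hper q (List.mem_cons_of_mem p hq))
          (fun v hv => h1 v (hmemtl1 v hv))
          (fun hnm => h1n (by
            simp only [List.map_cons, List.mem_cons]
            rintro (h | h)
            · exact hp1 h.symm
            · exact hnm h))
          (fun v hv => absurd (List.mem_map_of_mem (f := Prod.fst) hv) hnotintl)
          (fun _ => rfl)
          (fun hq => absurd (hp2.trans hq.symm) hp1)
        rw [htlres, pvOptMax_none_right, pvOptMax_comm]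
      · have hhead : pvMerge none (pvCTo f d n [p] k) = none := by
          rw [hper p (List.mem_cons_self), if_neg (by rintro (h | h); exact hp1 h; exact hp2 h)]
          rfl
        rw [hhead]
        have htlres := ih g1 g2 hnd.2
          (fun q hq => hper q (List.mem_cons_of_mem p hq))
          (fun v hv => h1 v (hmemtl1 v hv))
          (fun hnm => h1n (by
            simp only [List.map_cons, List.mem_cons]
            rintro (h | h)
            · exact hp1 h.symm
            · exact hnm h))
          (fun v hv => h2 v (hmemtl2 v hv))
          (fun hnm => h2n (by
            simp only [List.map_cons, List.mem_cons]
            rintro (h | h)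
            · exact hp2 h.symm
            · exact hnm h))
          hcase
        rw [htlres]
        rfl

-- per-item contributions to the new left key (s, s+r+1, s)
lemma pvCTo_single_L (f d : List Int) (n : Int) (r : Nat) (s : Int) (hs : 0 ≤ s)
    (p : (Int × Int × Int) × Int)
    (hsh : ∃ s' : Int, 0 ≤ s' ∧ s' + (r : Int) < n ∧
      (p.1 = (s', s' + (r : Int), s') ∨ p.1 = (s', s' + (r : Int), s' + (r : Int)))) :
    pvCTo f d n [p] (s, s + (r : Int) + 1, s) =
      if p.1 = (s + 1, s + 1 + (r : Int), s + 1) ∨ p.1 = (s + 1, s + 1 + (r : Int), s + 1 + (r : Int))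
      then (pvCand f d (some p.2) p.1.2.2 s).toList else [] := by
  obtain ⟨s', hs'0, hs'n, hsh⟩ := hsh
  obtain ⟨⟨a, e, t⟩, v⟩ := p
  simp only [Prod.mk.injEq] at hsh
  dsimp only [pvCTo, pvCand]
  simp only [List.flatMap_cons, List.flatMap_nil, List.append_nil, List.filterMap_append]
  simp only [pvContribs]
  rcases hsh with ⟨ha, he, ht⟩ | ⟨ha, he, ht⟩ <;> rw [ha, he, ht] <;>
    by_cases hss : s' = s + 1
  · subst hss
    simp only [show s + 1 - 1 = s from by omega, show s + 1 + (r : Int) = s + (r : Int) + 1 from by omega]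
    rw [if_pos (Or.inl (by trivial))]
    have hne2 : ((s + 1, s + (r : Int) + 1 + 1, s + (r : Int) + 1 + 1) : Int × Int × Int) ≠ (s, s + (r : Int) + 1, s) := by
      intro h; injection h with h1 _; omega
    split_ifs <;> simp_all [hne2]
  · have hne1 : ((s' - 1, s' + (r : Int), s' - 1) : Int × Int × Int) ≠ (s, s + (r : Int) + 1, s) := by
      intro h; injection h with h1 _; omega
    have hne2 : ((s', s' + (r : Int) + 1, s' + (r : Int) + 1) : Int × Int × Int) ≠ (s, s + (r : Int) + 1, s) := by
      intro h; injection h with h1 h2; injection h2 with h2 h3; omega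
    rw [if_neg (show ¬(((s', s' + (r : Int), s') : Int × Int × Int) = (s + 1, s + 1 + (r : Int), s + 1) ∨
        ((s', s' + (r : Int), s') : Int × Int × Int) = (s + 1, s + 1 + (r : Int), s + 1 + (r : Int))) from by
      rintro (h | h) <;> (injection h with h1 _; omega))]
    split_ifs <;> simp [hne1, hne2]
  · subst hss
    simp only [show s + 1 - 1 = s from by omega, show s + 1 + (r : Int) = s + (r : Int) + 1 from by omega]
    rw [if_pos (Or.inr (by trivial))]
    have hne2 : ((s + 1, s + (r : Int) + 1 + 1, s + (r : Int) + 1 + 1) : Int × Int × Int) ≠ (s, s + (r : Int) + 1, s) := by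
      intro h; injection h with h1 _; omega
    split_ifs <;> simp_all [hne2]
  · have hne1 : ((s' - 1, s' + (r : Int), s' - 1) : Int × Int × Int) ≠ (s, s + (r : Int) + 1, s) := by
      intro h; injection h with h1 _; omega
    have hne2 : ((s', s' + (r : Int) + 1, s' + (r : Int) + 1) : Int × Int × Int) ≠ (s, s + (r : Int) + 1, s) := by
      intro h; injection h with h1 h2; injection h2 with h2 h3; omega
    rw [if_neg (show ¬(((s', s' + (r : Int), s' + (r : Int)) : Int × Int × Int) = (s + 1, s + 1 + (r : Int), s + 1) ∨
        ((s', s' + (r : Int), s' + (r : Int)) : Int × Int × Int) = (s + 1, s + 1 + (r : Int), s + 1 + (r : Int))) from by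
      rintro (h | h) <;> (injection h with h1 _; omega))]
    split_ifs <;> simp [hne1, hne2]

-- per-item contributions to the new right key (s, s+r+1, s+r+1)
lemma pvCTo_single_R (f d : List Int) (n : Int) (r : Nat) (s : Int) (hn : s + (r : Int) + 1 < n)
    (p : (Int × Int × Int) × Int)
    (hsh : ∃ s' : Int, 0 ≤ s' ∧ s' + (r : Int) < n ∧
      (p.1 = (s', s' + (r : Int), s') ∨ p.1 = (s', s' + (r : Int), s' + (r : Int)))) :
    pvCTo f d n [p] (s, s + (r : Int) + 1, s + (r : Int) + 1) =
      if p.1 = (s, s + (r : Int), s) ∨ p.1 = (s, s + (r : Int), s + (r : Int))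
      then (pvCand f d (some p.2) p.1.2.2 (s + (r : Int) + 1)).toList else [] := by
  obtain ⟨s', hs'0, hs'n, hsh⟩ := hsh
  obtain ⟨⟨a, e, t⟩, v⟩ := p
  simp only [Prod.mk.injEq] at hsh
  dsimp only [pvCTo, pvCand]
  simp only [List.flatMap_cons, List.flatMap_nil, List.append_nil, List.filterMap_append]
  simp only [pvContribs]
  rcases hsh with ⟨ha, he, ht⟩ | ⟨ha, he, ht⟩ <;> rw [ha, he, ht] <;>
    by_cases hss : s' = s
  · rw [hss]
    rw [if_pos (Or.inl (by trivial))]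
    have hne1 : ((s - 1, s + (r : Int), s - 1) : Int × Int × Int) ≠ (s, s + (r : Int) + 1, s + (r : Int) + 1) := by
      intro h; injection h with h1 _; omega
    split_ifs <;> simp_all [hne1, abs_sub_comm] <;> omega
  · have hne1 : ((s' - 1, s' + (r : Int), s' - 1) : Int × Int × Int) ≠ (s, s + (r : Int) + 1, s + (r : Int) + 1) := by
      intro h; injection h with h1 h2; injection h2 with h2 h3; omega
    have hne2 : ((s', s' + (r : Int) + 1, s' + (r : Int) + 1) : Int × Int × Int) ≠ (s, s + (r : Int) + 1, s + (r : Int) + 1) := by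
      intro h; injection h with h1 _; omega
    rw [if_neg (show ¬(((s', s' + (r : Int), s') : Int × Int × Int) = (s, s + (r : Int), s) ∨
        ((s', s' + (r : Int), s') : Int × Int × Int) = (s, s + (r : Int), s + (r : Int))) from by
      rintro (h | h) <;> (injection h with h1 _; omega))]
    split_ifs <;> simp [hne1, hne2]
  · rw [hss]
    rw [if_pos (Or.inr (by trivial))]
    have hne1 : ((s - 1, s + (r : Int), s - 1) : Int × Int × Int) ≠ (s, s + (r : Int) + 1, s + (r : Int) + 1) := by
      intro h; injection h with h1 _; omega
    split_ifs <;> simp_all [hne1, abs_sub_comm] <;> omega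
  · have hne1 : ((s' - 1, s' + (r : Int), s' - 1) : Int × Int × Int) ≠ (s, s + (r : Int) + 1, s + (r : Int) + 1) := by
      intro h; injection h with h1 h2; injection h2 with h2 h3; omega
    have hne2 : ((s', s' + (r : Int) + 1, s' + (r : Int) + 1) : Int × Int × Int) ≠ (s, s + (r : Int) + 1, s + (r : Int) + 1) := by
      intro h; injection h with h1 _; omega
    rw [if_neg (show ¬(((s', s' + (r : Int), s' + (r : Int)) : Int × Int × Int) = (s, s + (r : Int), s) ∨
        ((s', s' + (r : Int), s' + (r : Int)) : Int × Int × Int) = (s, s + (r : Int), s + (r : Int))) from by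
      rintro (h | h) <;> (injection h with h1 _; omega))]
    split_ifs <;> simp [hne1, hne2]

lemma pvMerged_L (f d : List Int) (n : Int) (r : Nat) (D : PySem.Dict (Int × Int × Int) Int)
    (hM : pvMatch f d n r D) (s : Int) (hs : 0 ≤ s) (hn : s + (r : Int) + 1 < n) :
    pvMerge none (pvCTo f d n D.items (s, s + (r : Int) + 1, s)) = (pvG f d (r + 1) s).1 := by
  obtain ⟨hnd, hshape, hget⟩ := hM
  have hndi : (D.items.map Prod.fst).Nodup := by
    simpa [PySem.Dict.keys] using hnd
  have h2 := pvMerge_two f d n (s, s + (r : Int) + 1, s)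
    (s + 1, s + 1 + (r : Int), s + 1) (s + 1, s + 1 + (r : Int), s + 1 + (r : Int))
    (fun κ v => pvCand f d (some v) κ.2.2 s) D.items
    (pvCand f d (pvG f d r (s + 1)).1 (s + 1) s)
    (pvCand f d (pvG f d r (s + 1)).2 (s + 1 + (r : Int)) s)
    hndi
    (fun p hp => pvCTo_single_L f d n r s hs p (hshape p hp))
    (by
      intro v hv
      have hmem := PySem.Dict.get?_of_mem_items D hv hnd
      have hg := (hget (s + 1) (by omega) (by omega)).1
      dsimp only
      rw [hg.symm.trans hmem])
    (by
      intro hnm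
      have : D.get? (s + 1, s + 1 + (r : Int), s + 1) = none := by
        rw [PySem.Dict.get?_eq_none_iff_not_mem_keys]
        simpa [PySem.Dict.keys] using hnm
      have hg := (hget (s + 1) (by omega) (by omega)).1
      rw [← hg, this]
      rfl)
    (by
      intro v hv
      have hmem := PySem.Dict.get?_of_mem_items D hv hnd
      have hg := (hget (s + 1) (by omega) (by omega)).2
      dsimp only
      rw [hg.symm.trans hmem])
    (by
      intro hnm
      have : D.get? (s + 1, s + 1 + (r : Int), s + 1 + (r : Int)) = none := by
        rw [PySem.Dict.get?_eq_none_iff_not_mem_keys]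
        simpa [PySem.Dict.keys] using hnm
      have hg := (hget (s + 1) (by omega) (by omega)).2
      rw [← hg, this]
      rfl)
    (by
      intro hk
      injection hk with h1 h2; injection h2 with h2 h3
      have hr0 : r = 0 := by omega
      subst hr0
      simp [pvG, pvCand])
  rw [h2]
  simp [pvG]

lemma pvMerged_R (f d : List Int) (n : Int) (r : Nat) (D : PySem.Dict (Int × Int × Int) Int)
    (hM : pvMatch f d n r D) (s : Int) (hs : 0 ≤ s) (hn : s + (r : Int) + 1 < n) :
    pvMerge none (pvCTo f d n D.items (s, s + (r : Int) + 1, s + (r : Int) + 1)) = (pvG f d (r + 1) s).2 := by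
  obtain ⟨hnd, hshape, hget⟩ := hM
  have hndi : (D.items.map Prod.fst).Nodup := by
    simpa [PySem.Dict.keys] using hnd
  have h2 := pvMerge_two f d n (s, s + (r : Int) + 1, s + (r : Int) + 1)
    (s, s + (r : Int), s) (s, s + (r : Int), s + (r : Int))
    (fun κ v => pvCand f d (some v) κ.2.2 (s + (r : Int) + 1)) D.items
    (pvCand f d (pvG f d r s).1 s (s + (r : Int) + 1))
    (pvCand f d (pvG f d r s).2 (s + (r : Int)) (s + (r : Int) + 1))
    hndi
    (fun p hp => pvCTo_single_R f d n r s hn p (hshape p hp))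
    (by
      intro v hv
      have hmem := PySem.Dict.get?_of_mem_items D hv hnd
      have hg := (hget s hs (by omega)).1
      dsimp only
      rw [hg.symm.trans hmem])
    (by
      intro hnm
      have : D.get? (s, s + (r : Int), s) = none := by
        rw [PySem.Dict.get?_eq_none_iff_not_mem_keys]
        simpa [PySem.Dict.keys] using hnm
      have hg := (hget s hs (by omega)).1
      rw [← hg, this]
      rfl)
    (by
      intro v hv
      have hmem := PySem.Dict.get?_of_mem_items D hv hnd
      have hg := (hget s hs (by omega)).2
      dsimp only
      rw [hg.symm.trans hmem])
    (by
      intro hnm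
      have : D.get? (s, s + (r : Int), s + (r : Int)) = none := by
        rw [PySem.Dict.get?_eq_none_iff_not_mem_keys]
        simpa [PySem.Dict.keys] using hnm
      have hg := (hget s hs (by omega)).2
      rw [← hg, this]
      rfl)
    (by
      intro hk
      injection hk with h1 h2; injection h2 with h2 h3
      have hr0 : r = 0 := by omega
      subst hr0
      simp [pvG, pvCand])
  rw [h2]
  simp [pvG]

-- keys contributed by a shaped item are shaped for the next round
lemma pvContrib_shape (f d : List Int) (n : Int) (r : Nat) (p q : (Int × Int × Int) × Int)
    (hsh : ∃ s' : Int, 0 ≤ s' ∧ s' + (r : Int) < n ∧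
      (p.1 = (s', s' + (r : Int), s') ∨ p.1 = (s', s' + (r : Int), s' + (r : Int))))
    (hq : q ∈ pvContribs f d n p) :
    ∃ s2 : Int, 0 ≤ s2 ∧ s2 + (r : Int) + 1 < n ∧
      (q.1 = (s2, s2 + (r : Int) + 1, s2) ∨ q.1 = (s2, s2 + (r : Int) + 1, s2 + (r : Int) + 1)) := by
  obtain ⟨s', hs'0, hs'n, hsh⟩ := hsh
  obtain ⟨⟨a, e, t⟩, v⟩ := p
  simp only [Prod.mk.injEq] at hsh
  have ha : a = s' := by rcases hsh with ⟨h, _⟩ | ⟨h, _⟩ <;> exact h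
  have he : e = s' + (r : Int) := by rcases hsh with ⟨_, h, _⟩ | ⟨_, h, _⟩ <;> exact h
  dsimp only [pvContribs] at hq
  rcases List.mem_append.mp hq with h | h <;> split_ifs at h with hg <;>
    simp only [List.mem_singleton, List.mem_nil_iff] at h
  · refine ⟨a - 1, by omega, by omega, Or.inl ?_⟩
    rw [h]
    simp only [Prod.mk.injEq]
    exact ⟨trivial, by omega, trivial⟩
  · refine ⟨a, by omega, by omega, Or.inr ?_⟩
    rw [h]
    simp only [Prod.mk.injEq]
    exact ⟨trivial, by omega, by omega⟩

-- one round of A advances the invariant and updates max_towns like the spec rows do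
lemma pvRound (f d : List Int) (n : Int) (r : Nat) (mt : Int)
    (D : PySem.Dict (Int × Int × Int) Int) (hM : pvMatch f d n r D) :
    ∃ D', pvA_round f d n (mt, D) =
        ((if pvAlive f d n (r + 1) then max mt ((r : Int) + 2) else mt), D') ∧
      pvMatch f d n (r + 1) D' := by
  have hM' := hM
  obtain ⟨hnd, hshape, hget⟩ := hM
  have hshl : ∀ p ∈ D.items, ∃ s : Int, p.1 = (s, s + (r : Int), s) ∨ p.1 = (s, s + (r : Int), s + (r : Int)) :=
    fun p hp => (hshape p hp).imp (fun s hs => hs.2.2)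
  have hD'get : ∀ k : Int × Int × Int, (pvA_round f d n (mt, D)).2.get? k =
      pvMerge none (pvCTo f d n D.items k) := by
    intro k
    unfold pvA_round
    rw [pvFold_get]
    rw [PySem.Dict.get?_empty]
  have hD'nodup : (pvA_round f d n (mt, D)).2.keys.Nodup := by
    unfold pvA_round
    exact pvFold_nodup f d n D.items mt PySem.Dict.empty PySem.Dict.nodup_keys_empty
  have hcast : ((r + 1 : Nat) : Int) = (r : Int) + 1 := by push_cast; ring
  have hcond : ((D.items.flatMap (pvContribs f d n)).any
      fun q => ((PySem.Dict.empty (κ := Int × Int × Int) (ν := Int)).get? q.1).isNone) = pvAlive f d n (r + 1) := by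
    rcases hal : pvAlive f d n (r + 1) with _ | _
    · rcases hany : ((D.items.flatMap (pvContribs f d n)).any
          fun q => ((PySem.Dict.empty (κ := Int × Int × Int) (ν := Int)).get? q.1).isNone) with _ | _
      · rfl
      · exfalso
        obtain ⟨q, hqmem, -⟩ := List.any_eq_true.mp hany
        obtain ⟨p, hpmem, hqc⟩ := List.mem_flatMap.mp hqmem
        obtain ⟨s2, hs20, hs2n, hsh2⟩ := pvContrib_shape f d n r p q (hshape p hpmem) hqc
        have hne : pvCTo f d n D.items q.1 ≠ [] := by
          intro hnil
          have hmm : q.2 ∈ pvCTo f d n D.items q.1 := by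
            dsimp only [pvCTo]
            exact List.mem_filterMap.mpr ⟨q, List.mem_flatMap.mpr ⟨p, hpmem, hqc⟩, by simp⟩
          rw [hnil] at hmm
          exact absurd hmm (List.not_mem_nil)
        have hsome : ((pvG f d (r + 1) s2).1.isSome || (pvG f d (r + 1) s2).2.isSome) = true := by
          rcases hsh2 with hk | hk
          · have hml := pvMerged_L f d n r D hM' s2 hs20 hs2n
            rw [← hk] at hml
            have : (pvG f d (r + 1) s2).1.isSome = true := by
              rw [← hml, pvMerge_isSome]
              simp [List.isEmpty_iff, hne]
            simp [this]
          · have hmr := pvMerged_R f d n r D hM' s2 hs20 hs2n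
            rw [← hk] at hmr
            have : (pvG f d (r + 1) s2).2.isSome = true := by
              rw [← hmr, pvMerge_isSome]
              simp [List.isEmpty_iff, hne]
            simp [this]
        have : pvAlive f d n (r + 1) = true := by
          unfold pvAlive
          refine List.any_eq_true.mpr ⟨s2, ?_, hsome⟩
          rw [PySem.List.mem_pyRange_one]
          constructor
          · exact hs20
          · rw [hcast]; omega
        rw [hal] at this
        exact Bool.false_ne_true this
    · obtain ⟨s2, hmem, hpred⟩ := List.any_eq_true.mp hal
      rw [PySem.List.mem_pyRange_one] at hmem
      have hs20 : 0 ≤ s2 := hmem.1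
      have hs2n : s2 + (r : Int) + 1 < n := by
        have := hmem.2
        rw [hcast] at this
        omega
      have hctone : ∃ k : Int × Int × Int, pvCTo f d n D.items k ≠ [] := by
        rcases Bool.or_eq_true_iff.mp hpred with hp1 | hp1
        · refine ⟨(s2, s2 + (r : Int) + 1, s2), ?_⟩
          intro hnil
          have hml := pvMerged_L f d n r D hM' s2 hs20 hs2n
          rw [hnil] at hml
          rw [← hml] at hp1
          simp [pvMerge] at hp1
        · refine ⟨(s2, s2 + (r : Int) + 1, s2 + (r : Int) + 1), ?_⟩
          intro hnil
          have hmr := pvMerged_R f d n r D hM' s2 hs20 hs2n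
          rw [hnil] at hmr
          rw [← hmr] at hp1
          simp [pvMerge] at hp1
      obtain ⟨k, hk⟩ := hctone
      have hFMne : D.items.flatMap (pvContribs f d n) ≠ [] := by
        intro hFM
        apply hk
        dsimp only [pvCTo]
        rw [hFM]
        rfl
      obtain ⟨q, hq⟩ := List.exists_mem_of_ne_nil _ hFMne
      exact List.any_eq_true.mpr ⟨q, hq, by simp⟩
  refine ⟨(pvA_round f d n (mt, D)).2, ?_, ?_, ?_, ?_⟩
  · have hmt : (pvA_round f d n (mt, D)).1 =
        if pvAlive f d n (r + 1) then max mt ((r : Int) + 2) else mt := by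
      unfold pvA_round
      rw [pvFold_mt f d n r D.items hshl mt PySem.Dict.empty]
      unfold pvA_round at hcond
      rw [hcond]
    exact Prod.ext hmt rfl
  · exact hD'nodup
  · intro p' hp'
    have hsome := PySem.Dict.get?_of_mem_items (pvA_round f d n (mt, D)).2 hp' hD'nodup
    rw [hD'get] at hsome
    have hne : pvCTo f d n D.items p'.1 ≠ [] := by
      intro hnil
      rw [hnil] at hsome
      simp [pvMerge] at hsome
    have : ∃ q ∈ D.items.flatMap (pvContribs f d n), q.1 = p'.1 := by
      by_contra hno
      push_neg at hno
      apply hne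
      dsimp only [pvCTo]
      rw [List.filterMap_eq_nil_iff]
      intro a ha
      rw [if_neg (hno a ha)]
    obtain ⟨q, hqmem, hqk⟩ := this
    obtain ⟨p, hpmem, hqc⟩ := List.mem_flatMap.mp hqmem
    obtain ⟨s2, hs20, hs2n, hsh2⟩ := pvContrib_shape f d n r p q (hshape p hpmem) hqc
    refine ⟨s2, hs20, ?_, ?_⟩
    · rw [hcast]; omega
    · rw [hcast]
      simp only [← add_assoc]
      rw [← hqk]
      exact hsh2
  · intro s hs0 hsn
    rw [hcast] at hsn
    have hsn' : s + (r : Int) + 1 < n := by omega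
    constructor
    · have hml := pvMerged_L f d n r D hM' s hs0 hsn'
      rw [hD'get, hcast, show s + ((r : Int) + 1) = s + (r : Int) + 1 from by ring]
      exact hml
    · have hmr := pvMerged_R f d n r D hM' s hs0 hsn'
      rw [hD'get, hcast, show s + ((r : Int) + 1) = s + (r : Int) + 1 from by ring]
      exact hmr

lemma pvFoldl_const {α β : Type} (h : β → β) : ∀ (l : List α) (init : β),
    l.foldl (fun st _ => h st) init = h^[l.length] init := by
  intro l
  induction l with
  | nil => intro init; rfl
  | cons x xs ih => intro init; simpa [Function.iterate_succ_apply] using ih (h init)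

lemma pvMtB_le (f d : List Int) (n : Int) : ∀ k : Nat, pvMtB f d n k ≤ (k : Int) + 1 := by
  intro k
  induction k with
  | zero => simp [pvMtB]
  | succ k ih =>
    simp only [pvMtB]
    split
    · push_cast; omega
    · omega

-- A's iterates: mt equals the layer-maximum, dict matches the spec rows
lemma pvA_iter (f d : List Int) (n : Int) (D0 : PySem.Dict (Int × Int × Int) Int)
    (h0 : pvMatch f d n 0 D0) :
    ∀ k : Nat, ∃ D, (pvA_round f d n)^[k] (1, D0) = (pvMtB f d n k, D) ∧ pvMatch f d n k D := by
  intro k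
  induction k with
  | zero => exact ⟨D0, rfl, h0⟩
  | succ k ih =>
    obtain ⟨D, hEq, hMk⟩ := ih
    obtain ⟨D', hR, hM'⟩ := pvRound f d n k (pvMtB f d n k) D hMk
    refine ⟨D', ?_, hM'⟩
    rw [Function.iterate_succ_apply', hEq, hR]
    have hle := pvMtB_le f d n k
    cases h : pvAlive f d n (k + 1)
    · simp [pvMtB, h]
    · simp only [pvMtB, h, if_true]
      rw [max_eq_right (by omega)]

lemma pvInit_match (f d : List Int) :
    pvMatch f d (f.length : Int) 0
      ((PySem.List.pyRange 0 (f.length : Int) 1).foldl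
        (fun dd i => dd.insert (i, i, i) (pvIdx f i)) PySem.Dict.empty) := by
  have hfresh : ∀ i ∈ PySem.List.pyRange 0 (f.length : Int) 1,
      (PySem.Dict.empty (κ := Int × Int × Int) (ν := Int)).contains (i, i, i) = false := by
    intro i _
    simp [PySem.Dict.contains_empty]
  have hnodupmap : ((PySem.List.pyRange 0 (f.length : Int) 1).map
      (fun i => ((i, i, i) : Int × Int × Int))).Nodup := by
    refine List.Nodup.map ?_ (PySem.List.nodup_pyRange_one _ _)
    intro a b h
    injection h
  have hitems := PySem.Dict.items_foldl_insert_fresh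
      (PySem.List.pyRange 0 (f.length : Int) 1) (fun i => ((i, i, i) : Int × Int × Int))
      (fun i => pvIdx f i) PySem.Dict.empty hfresh hnodupmap
  simp only [List.nil_append] at hitems
  rw [show (PySem.Dict.empty (κ := Int × Int × Int) (ν := Int)).items = [] from rfl,
    List.nil_append] at hitems
  refine ⟨?_, ?_, ?_⟩
  · simp only [PySem.Dict.keys, hitems, List.map_map]
    simpa using hnodupmap
  · intro p hp
    rw [hitems] at hp
    obtain ⟨i, hi, hpe⟩ := List.mem_map.mp hp
    rw [PySem.List.mem_pyRange_one] at hi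
    refine ⟨i, hi.1, by simpa using hi.2, Or.inl ?_⟩
    rw [← hpe]
    simp
  · intro s hs0 hsn
    simp only [Nat.cast_zero, add_zero] at hsn ⊢
    have hmem : (((s, s, s) : Int × Int × Int), pvIdx f s) ∈
        ((PySem.List.pyRange 0 (f.length : Int) 1).foldl
          (fun dd i => dd.insert (i, i, i) (pvIdx f i)) PySem.Dict.empty).items := by
      rw [hitems]
      exact List.mem_map.mpr ⟨s, PySem.List.mem_pyRange_one.mpr ⟨hs0, by omega⟩, rfl⟩
    have hnd : ((PySem.List.pyRange 0 (f.length : Int) 1).foldl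
        (fun dd i => dd.insert (i, i, i) (pvIdx f i)) PySem.Dict.empty).keys.Nodup := by
      simp only [PySem.Dict.keys, hitems, List.map_map]
      simpa using hnodupmap
    have hg := PySem.Dict.get?_of_mem_items _ hmem hnd
    exact ⟨hg, hg⟩

-- ===== B-side lemmas =====

-- Source B's _step over the pair is the max of the two candidate moves
lemma pvStepB_pair (f d : List Int) (a b : Option Int) (t1 t2 tgt : Int) :
    pvStepB f d (a, b) t1 t2 tgt = pvOptMax (pvCand f d a t1 tgt) (pvCand f d b t2 tgt) := by
  cases a <;> cases b <;>
    simp only [pvStepB, pvCand, List.foldl_cons, List.foldl_nil] <;>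
    (try split_ifs) <;> (repeat' split) <;> simp_all [pvOptMax, Int.max_def] <;> omega

-- downward closure: a block whose two sub-blocks are dead is dead
lemma pvG_succ_dead (f d : List Int) (r : Nat) (s : Int)
    (h1 : pvG f d r s = (none, none)) (h2 : pvG f d r (s + 1) = (none, none)) :
    pvG f d (r + 1) s = (none, none) := by
  simp [pvG, h1, h2, pvCand, pvOptMax]

-- the freshly computed cell of column e at start s is the spec value of block [s, e]
lemma pvCellEq (f d : List Int) (e s : Int) (hse : s ≤ e - 1) :
    (pvStepB f d (pvG f d (e - 1 - s).toNat (s + 1)) (s + 1) e s,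
     pvStepB f d (pvG f d (e - 1 - s).toNat s) s (e - 1) e) =
    pvG f d ((e - 1 - s).toNat + 1) s := by
  have hrc : (((e - 1 - s).toNat : Nat) : Int) = e - 1 - s := Int.toNat_of_nonneg (by omega)
  set r := (e - 1 - s).toNat with hr
  have hG : pvG f d (r + 1) s =
      (pvOptMax (pvCand f d (pvG f d r (s + 1)).1 (s + 1) s)
                (pvCand f d (pvG f d r (s + 1)).2 (s + 1 + (r : Int)) s),
       pvOptMax (pvCand f d (pvG f d r s).1 s (s + (r : Int) + 1))
                (pvCand f d (pvG f d r s).2 (s + (r : Int)) (s + (r : Int) + 1))) := rfl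
  have h1 : s + 1 + (r : Int) = e := by omega
  have h2 : s + (r : Int) + 1 = e := by omega
  have h3 : s + (r : Int) = e - 1 := by omega
  rw [hG, h1, h2, h3]
  rw [show pvG f d r (s + 1) = ((pvG f d r (s + 1)).1, (pvG f d r (s + 1)).2) from rfl,
      show pvG f d r s = ((pvG f d r s).1, (pvG f d r s).2) from rfl,
      pvStepB_pair, pvStepB_pair]

-- "X is the maximal reachable block length" (blocks [s, s+r] with r ≤ R inside [0, n))
def pvIsBest (f d : List Int) (n : Int) (R : Nat) (X : Int) : Prop :=
  1 ≤ X ∧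
  (∀ (r : Nat) (s : Int), r ≤ R → 0 ≤ s → s + (r : Int) < n →
      pvG f d r s ≠ (none, none) → (r : Int) + 1 ≤ X) ∧
  (X = 1 ∨ ∃ (r : Nat) (s : Int), r ≤ R ∧ 0 ≤ s ∧ s + (r : Int) < n ∧
      pvG f d r s ≠ (none, none) ∧ X = (r : Int) + 1)

lemma pvIsBest_unique (f d : List Int) (n : Int) (R : Nat) (X Y : Int)
    (hX : pvIsBest f d n R X) (hY : pvIsBest f d n R Y) : X = Y := by
  obtain ⟨hX1, hXb, hXw⟩ := hX
  obtain ⟨hY1, hYb, hYw⟩ := hY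
  have hXY : X ≤ Y := by
    rcases hXw with h | ⟨r, s, hr, hs, hn, ha, hXe⟩
    · omega
    · have := hYb r s hr hs hn ha
      omega
  have hYX : Y ≤ X := by
    rcases hYw with h | ⟨r, s, hr, hs, hn, ha, hYe⟩
    · omega
    · have := hXb r s hr hs hn ha
      omega
  omega

lemma pvAlive_iff (f d : List Int) (n : Int) (r : Nat) :
    pvAlive f d n r = true ↔
      ∃ s : Int, 0 ≤ s ∧ s + (r : Int) < n ∧ pvG f d r s ≠ (none, none) := by
  unfold pvAlive
  rw [List.any_eq_true]
  constructor
  · rintro ⟨s, hmem, hp⟩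
    rw [PySem.List.mem_pyRange_one] at hmem
    refine ⟨s, hmem.1, by omega, ?_⟩
    intro hdead
    rw [hdead] at hp
    simp at hp
  · rintro ⟨s, hs, hn, ha⟩
    refine ⟨s, PySem.List.mem_pyRange_one.mpr ⟨hs, by omega⟩, ?_⟩
    cases hg1 : (pvG f d r s).1 with
    | some v => simp [hg1]
    | none =>
      cases hg2 : (pvG f d r s).2 with
      | some v => simp [hg1, hg2]
      | none => exact absurd (Prod.ext hg1 hg2) ha

lemma pvMtB_isBest (f d : List Int) (n : Int) :
    ∀ k : Nat, pvIsBest f d n k (pvMtB f d n k) := by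
  intro k
  induction k with
  | zero =>
    refine ⟨le_refl 1, ?_, Or.inl rfl⟩
    intro r s hr hs hn ha
    interval_cases r
    simp [pvMtB]
  | succ k ih =>
    obtain ⟨ih1, ihb, ihw⟩ := ih
    by_cases hal : pvAlive f d n (k + 1) = true
    · obtain ⟨s, hs, hn, ha⟩ := (pvAlive_iff f d n (k + 1)).mp hal
      have hv : pvMtB f d n (k + 1) = (k : Int) + 2 := by simp [pvMtB, hal]
      rw [hv]
      refine ⟨by omega, ?_, Or.inr ⟨k + 1, s, le_refl _, hs, by push_cast at hn ⊢; omega, ha, by push_cast; omega⟩⟩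
      intro r s' hr hs' hn' ha'
      have : (r : Int) ≤ (k : Int) + 1 := by exact_mod_cast hr
      omega
    · have hv : pvMtB f d n (k + 1) = pvMtB f d n k := by simp [pvMtB, hal]
      rw [hv]
      refine ⟨ih1, ?_, ?_⟩
      · intro r s hr hs hn ha
        rcases Nat.lt_or_ge r (k + 1) with h | h
        · exact ihb r s (by omega) hs hn ha
        · have hrk : r = k + 1 := by omega
          subst hrk
          exact absurd ((pvAlive_iff f d n (k + 1)).mpr ⟨s, hs, hn, ha⟩) hal
      · rcases ihw with h | ⟨r, s, hr, hs, hn, ha, he⟩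
        · exact Or.inl h
        · exact Or.inr ⟨r, s, by omega, hs, hn, ha, he⟩

-- the partial best invariant during column e's descent:
-- best bounds/witnesses all blocks with endpoint ≤ e-1 or endpoint e and start > s
def pvPB (f d : List Int) (n e s best : Int) : Prop :=
  1 ≤ best ∧
  (∀ (r : Nat) (s' : Int), 0 ≤ s' → s' + (r : Int) < n →
      (s' + (r : Int) ≤ e - 1 ∨ (s' + (r : Int) = e ∧ s < s')) →
      pvG f d r s' ≠ (none, none) → (r : Int) + 1 ≤ best) ∧
  (best = 1 ∨ ∃ (r : Nat) (s' : Int), 0 ≤ s' ∧ s' + (r : Int) < n ∧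
      (s' + (r : Int) ≤ e - 1 ∨ (s' + (r : Int) = e ∧ s < s')) ∧
      pvG f d r s' ≠ (none, none) ∧ best = (r : Int) + 1)

-- all skipped cells of column e below the break point are dead
lemma pvDead_below (f d : List Int) (n e s best : Int) (hen : e < n)
    (hPB : pvPB f d n e s best) (hs : 0 ≤ s) (hwin : e - s > best + 1) :
    ∀ (j : Nat) (s' : Int), s' = s - (j : Int) → 0 ≤ s' →
      pvG f d (e - s').toNat s' = (none, none) := by
  obtain ⟨h1, hb, -⟩ := hPB
  intro j
  induction j with
  | zero =>
    intro s' hs' hs'0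
    have hse : s' = s := by omega
    subst hse
    have hr : (e - s').toNat = (e - 1 - s').toNat + 1 := by omega
    rw [hr]
    apply pvG_succ_dead
    · by_contra ha
      have := hb (e - 1 - s').toNat s' hs'0
        (by rw [Int.toNat_of_nonneg (by omega)]; omega)
        (Or.inl (by rw [Int.toNat_of_nonneg (by omega)]; omega)) ha
      rw [Int.toNat_of_nonneg (by omega)] at this
      omega
    · by_contra ha
      have := hb (e - 1 - s').toNat (s' + 1) (by omega)
        (by rw [Int.toNat_of_nonneg (by omega)]; omega)
        (Or.inr (by rw [Int.toNat_of_nonneg (by omega)]; constructor <;> omega)) ha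
      rw [Int.toNat_of_nonneg (by omega)] at this
      omega
  | succ j ihj =>
    intro s' hs' hs'0
    have hr : (e - s').toNat = (e - 1 - s').toNat + 1 := by omega
    rw [hr]
    apply pvG_succ_dead
    · by_contra ha
      have := hb (e - 1 - s').toNat s' hs'0
        (by rw [Int.toNat_of_nonneg (by omega)]; omega)
        (Or.inl (by rw [Int.toNat_of_nonneg (by omega)]; omega)) ha
      rw [Int.toNat_of_nonneg (by omega)] at this
      omega
    · have := ihj (s' + 1) (by omega) (by omega)
      have harg : (e - (s' + 1)).toNat = (e - 1 - s').toNat := by omega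
      rw [harg] at this
      exact this

-- processing one cell extends the partial-best invariant one step down
lemma pvPB_step (f d : List Int) (n e best s : Int) (hs0 : 0 ≤ s) (hse : s ≤ e - 1)
    (hen : e < n) (hPB : pvPB f d n e s best) :
    pvPB f d n e (s - 1)
      (if pvG f d ((e - 1 - s).toNat + 1) s ≠ ((none : Option Int), (none : Option Int))
       then max best (e - s + 1) else best) := by
  obtain ⟨h1, hb, hw⟩ := hPB
  have hrc : (((e - 1 - s).toNat : Nat) : Int) = e - 1 - s := Int.toNat_of_nonneg (by omega)
  have hregmono : ∀ (r : Nat) (s' : Int), (s' + (r : Int) ≤ e - 1 ∨ (s' + (r : Int) = e ∧ s < s')) →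
      (s' + (r : Int) ≤ e - 1 ∨ (s' + (r : Int) = e ∧ s - 1 < s')) := by
    rintro r s' (h | ⟨h, h'⟩)
    · exact Or.inl h
    · exact Or.inr ⟨h, by omega⟩
  by_cases hc : pvG f d ((e - 1 - s).toNat + 1) s ≠ ((none : Option Int), (none : Option Int))
  · rw [if_pos hc]
    refine ⟨by omega, ?_, ?_⟩
    · intro r s' h0 hn hreg ha
      rcases hreg with h | ⟨h, h'⟩
      · have := hb r s' h0 hn (Or.inl h) ha
        omega
      · by_cases hss : s < s'
        · have := hb r s' h0 hn (Or.inr ⟨h, hss⟩) ha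
          omega
        · have hse' : s' = s := by omega
          have hre : (r : Int) = e - s := by omega
          omega
    · by_cases hmx : best ≤ e - s + 1
      · refine Or.inr ⟨(e - 1 - s).toNat + 1, s, hs0, ?_, Or.inr ⟨?_, by omega⟩, hc, ?_⟩
        · push_cast
          omega
        · push_cast
          omega
        · rw [max_eq_right hmx]
          push_cast
          omega
      · rcases hw with h | ⟨r, s', h0, hn, hreg, ha, he⟩
        · omega
        · exact Or.inr ⟨r, s', h0, hn, hregmono r s' hreg, ha, by omega⟩
  · rw [if_neg hc]
    refine ⟨h1, ?_, ?_⟩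
    · intro r s' h0 hn hreg ha
      rcases hreg with h | ⟨h, h'⟩
      · exact hb r s' h0 hn (Or.inl h) ha
      · by_cases hss : s < s'
        · exact hb r s' h0 hn (Or.inr ⟨h, hss⟩) ha
        · exfalso
          have hse' : s' = s := by omega
          subst hse'
          have hre : r = (e - 1 - s').toNat + 1 := by omega
          rw [hre] at ha
          exact hc ha
    · rcases hw with h | ⟨r, s', h0, hn, hreg, ha, he⟩
      · exact Or.inl h
      · exact Or.inr ⟨r, s', h0, hn, hregmono r s' hreg, ha, he⟩

-- on loop exit the invariant covers the whole column (skipped cells are dead)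
lemma pvPB_exit (f d : List Int) (n e s best : Int) (hen : e < n) (hs1 : -1 ≤ s)
    (hse : s ≤ e - 1)
    (hnc : ¬(0 ≤ s ∧ e - s ≤ best + 1)) (hPB : pvPB f d n e s best) :
    pvPB f d n e (-1) best := by
  obtain ⟨h1, hb, hw⟩ := hPB
  refine ⟨h1, ?_, ?_⟩
  · intro r s' h0 hn hreg ha
    rcases hreg with h | ⟨h, h'⟩
    · exact hb r s' h0 hn (Or.inl h) ha
    · by_cases hss : s < s'
      · exact hb r s' h0 hn (Or.inr ⟨h, hss⟩) ha
      · exfalso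
        have hs00 : 0 ≤ s := by omega
        have hwin : e - s > best + 1 := by omega
        have hdead := pvDead_below f d n e s best hen ⟨h1, hb, hw⟩ hs00 hwin
          (s - s').toNat s' (by omega) h0
        have hre : r = (e - s').toNat := by omega
        rw [hre] at ha
        exact ha hdead
  · rcases hw with h | ⟨r, s', h0, hn, hreg, ha, he⟩
    · exact Or.inl h
    · refine Or.inr ⟨r, s', h0, hn, ?_, ha, he⟩
      rcases hreg with h | ⟨h, h'⟩
      · exact Or.inl h
      · exact Or.inr ⟨h, by omega⟩

-- on loop exit every cell of column e at or above the segment length is dead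
lemma pvSegDead_exit (f d : List Int) (n e s best : Int) (hen : e < n) (hs1 : -1 ≤ s)
    (hse : s ≤ e - 1)
    (hnc : ¬(0 ≤ s ∧ e - s ≤ best + 1)) (hPB : pvPB f d n e s best) :
    ∀ k : Nat, (e - s).toNat ≤ k → (k : Int) ≤ e → pvG f d k (e - (k : Int)) = (none, none) := by
  intro k hk hke
  have hs00 : 0 ≤ s := by
    by_contra h
    have hsm : s = -1 := by omega
    subst hsm
    omega
  have hwin : e - s > best + 1 := by omega
  have hKc : ((e - s).toNat : Int) = e - s := Int.toNat_of_nonneg (by omega)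
  have hkc : e - (k : Int) ≤ s := by omega
  have hdead := pvDead_below f d n e s best hen hPB hs00 hwin
    (s - (e - (k : Int))).toNat (e - (k : Int)) (by omega) (by omega)
  have hre : (e - (e - (k : Int))).toNat = k := by omega
  rw [hre] at hdead
  exact hdead

-- full specification of the inner descent
lemma pvInner_spec (f d : List Int) (n e : Int) (he : 0 ≤ e) (hen : e < n)
    (prev : List (Option Int × Option Int))
    (hplen : (prev.length : Int) ≤ e)
    (hpget : ∀ k : Nat, k < prev.length →
        PySem.List.pyGetD prev (k : Int) (none, none) = pvG f d k (e - 1 - (k : Int)))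
    (hpdead : ∀ k : Nat, prev.length ≤ k → (k : Int) ≤ e - 1 →
        pvG f d k (e - 1 - (k : Int)) = (none, none)) :
    ∀ (fuel : Nat) (s best : Int) (seg : List (Option Int × Option Int)),
    (s + 1).toNat ≤ fuel → s ≤ e - 1 → -1 ≤ s →
    seg = (List.range (e - s).toNat).map (fun k => pvG f d k (e - (k : Int))) →
    pvPB f d n e s best →
    (pvPB f d n e (-1) (pvInner f d e best seg prev s).1 ∧
      ∃ K : Nat, (pvInner f d e best seg prev s).2 =
          (List.range K).map (fun k => pvG f d k (e - (k : Int))) ∧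
        1 ≤ K ∧ (K : Int) ≤ e + 1 ∧
        (∀ k : Nat, K ≤ k → (k : Int) ≤ e → pvG f d k (e - (k : Int)) = (none, none))) := by
  intro fuel
  induction fuel with
  | zero =>
    intro s best seg hfuel hse hs1 hseg hPB
    have hsm : s = -1 := by omega
    subst hsm
    have hnc : ¬(0 ≤ (-1 : Int) ∧ e - (-1) ≤ best + 1) := by
      rintro ⟨h, -⟩
      omega
    rw [pvInner, dif_neg hnc]
    refine ⟨hPB, (e + 1).toNat, hseg, by omega, by omega, ?_⟩
    intro k hk hke
    omega
  | succ m ih =>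
    intro s best seg hfuel hse hs1 hseg hPB
    by_cases hc : 0 ≤ s ∧ e - s ≤ best + 1
    · rw [pvInner, dif_pos hc]
      have hs0 : 0 ≤ s := hc.1
      have hrc : (((e - 1 - s).toNat : Nat) : Int) = e - 1 - s := Int.toNat_of_nonneg (by omega)
      have hm : (e - s).toNat = (e - 1 - s).toNat + 1 := by omega
      -- seg[-1] is the state of block [s+1, e]
      have hright : PySem.List.pyGetD seg (-1) ((none : Option Int), (none : Option Int)) =
          pvG f d (e - 1 - s).toNat (s + 1) := by
        rw [hseg, hm, List.range_succ, List.map_append, List.map_singleton,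
          PySem.List.pyGetD_neg_one_append_singleton]
        have : e - (((e - 1 - s).toNat : Nat) : Int) = s + 1 := by omega
        rw [this]
      -- the `below` read is the state of block [s, e-1] (dead if pruned last sweep)
      have hbelow : (if e - 1 - s < (prev.length : Int) then
            PySem.List.pyGetD prev (e - 1 - s) ((none : Option Int), (none : Option Int))
          else ((none : Option Int), (none : Option Int))) =
          pvG f d (e - 1 - s).toNat s := by
        by_cases hpl : e - 1 - s < (prev.length : Int)
        · rw [if_pos hpl, ← hrc, hpget (e - 1 - s).toNat (by omega)]
          congr 1
          omega
        · rw [if_neg hpl]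
          have := hpdead (e - 1 - s).toNat (by omega) (by omega)
          rw [show e - 1 - (((e - 1 - s).toNat : Nat) : Int) = s from by omega] at this
          exact this.symm
      dsimp only []
      rw [hright, hbelow]
      have hcell := pvCellEq f d e s hse
      rw [hcell]
      have hsegeq : seg ++ [pvG f d ((e - 1 - s).toNat + 1) s] =
          (List.range (e - (s - 1)).toNat).map (fun k => pvG f d k (e - (k : Int))) := by
        have hm2 : (e - (s - 1)).toNat = (e - s).toNat + 1 := by omega
        rw [hm2, List.range_succ, List.map_append, List.map_singleton, ← hseg, hm,
          show e - (((e - 1 - s).toNat + 1 : Nat) : Int) = s from by omega]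
      rw [hsegeq]
      exact ih (s - 1)
        (if pvG f d ((e - 1 - s).toNat + 1) s ≠ ((none : Option Int), (none : Option Int))
         then max best (e - s + 1) else best)
        _ (by omega) (by omega) (by omega) rfl
        (pvPB_step f d n e best s hs0 hse hen hPB)
    · rw [pvInner, dif_neg hc]
      refine ⟨pvPB_exit f d n e s best hen hs1 hse hc hPB, (e - s).toNat, hseg, by omega, by omega,
        pvSegDead_exit f d n e s best hen hs1 hse hc hPB⟩

-- opening a new column extends the invariant's region by its trivial one-town block
lemma pvPB_shift (f d : List Int) (n E best : Int)
    (h : pvPB f d n (E - 1) (-1) best) : pvPB f d n E (E - 1) best := by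
  obtain ⟨h1, hb, hw⟩ := h
  refine ⟨h1, ?_, ?_⟩
  · intro r s' h0 hn hreg ha
    rcases hreg with hcase | ⟨hE, hgt⟩
    · by_cases hend : s' + (r : Int) ≤ E - 2
      · exact hb r s' h0 hn (Or.inl (by omega)) ha
      · exact hb r s' h0 hn (Or.inr ⟨by omega, by omega⟩) ha
    · have hr0 : (r : Int) = 0 := by omega
      omega
  · rcases hw with h | ⟨r, s', h0, hn, hreg, ha, he⟩
    · exact Or.inl h
    · refine Or.inr ⟨r, s', h0, hn, ?_, ha, he⟩
      rcases hreg with hcase | ⟨hE, hgt⟩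
      · exact Or.inl (by omega)
      · exact Or.inl (by omega)

-- one column of B's sweep, stated for the outer fold
lemma pvOuter (f d : List Int) (n : Int) (hn : n = (f.length : Int)) :
    ∀ e : Nat, (e : Int) ≤ n →
    ∃ best seg,
      (PySem.List.pyRange 0 (e : Int) 1).foldl (fun st i =>
          pvInner f d i st.1 [(some (pvIdx f i), some (pvIdx f i))] st.2 (i - 1))
        (1, ([] : List (Option Int × Option Int))) = (best, seg) ∧
      pvPB f d n ((e : Int) - 1) (-1) best ∧
      ∃ K : Nat, seg = (List.range K).map (fun k => pvG f d k ((e : Int) - 1 - (k : Int))) ∧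
        (K : Int) ≤ (e : Int) ∧
        (∀ k : Nat, K ≤ k → (k : Int) ≤ (e : Int) - 1 →
          pvG f d k ((e : Int) - 1 - (k : Int)) = (none, none)) := by
  intro e
  induction e with
  | zero =>
    intro _
    refine ⟨1, [], ?_, ?_, 0, rfl, by omega, ?_⟩
    · rw [PySem.List.pyRange_one_eq_nil (by omega)]
      rfl
    · refine ⟨le_refl 1, ?_, Or.inl rfl⟩
      intro r s' h0 hn' hreg ha
      rcases hreg with h' | ⟨h', hgt⟩ <;> omega
    · intro k hk hke
      exact absurd hke (by omega)
  | succ e ih =>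
    intro hle
    have hsucc : ((e + 1 : Nat) : Int) = (e : Int) + 1 := by push_cast; ring
    have hen : (e : Int) < n := by
      rw [hsucc] at hle
      omega
    obtain ⟨best, seg, hfold, hPB, K, hsegspec, hK, hdeads⟩ := ih (by omega)
    have hE0 : (0 : Int) ≤ (e : Int) := by positivity
    have hlen : seg.length = K := by rw [hsegspec]; simp
    have hplen : ((seg.length : Nat) : Int) ≤ (e : Int) := by rw [hlen]; exact hK
    have hpget : ∀ k : Nat, k < seg.length →
        PySem.List.pyGetD seg (k : Int) (none, none) = pvG f d k ((e : Int) - 1 - (k : Int)) := by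
      intro k hk
      rw [hlen] at hk
      rw [hsegspec, PySem.List.pyGetD_natCast]
      simp [List.getD, List.getElem?_map, List.getElem?_range, hk]
    have hpdead : ∀ k : Nat, seg.length ≤ k → (k : Int) ≤ (e : Int) - 1 →
        pvG f d k ((e : Int) - 1 - (k : Int)) = (none, none) := by
      intro k hk hke
      exact hdeads k (hlen ▸ hk) hke
    have hseg0 : [((some (pvIdx f (e : Int))), some (pvIdx f (e : Int)))] =
        (List.range ((e : Int) - ((e : Int) - 1)).toNat).map (fun k => pvG f d k ((e : Int) - (k : Int))) := by
      rw [show ((e : Int) - ((e : Int) - 1)).toNat = 1 from by omega]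
      simp [List.range_one, pvG]
    obtain ⟨hPB', K', hseg', hK1, hK2, hdead'⟩ :=
      pvInner_spec f d n (e : Int) hE0 hen seg hplen hpget hpdead e ((e : Int) - 1) best
        [((some (pvIdx f (e : Int))), some (pvIdx f (e : Int)))]
        (by omega) (by omega) (by omega) hseg0 (pvPB_shift f d n (e : Int) best hPB)
    rw [hsucc, PySem.List.pyRange_one_succ_right hE0, List.foldl_append, hfold]
    simp only [List.foldl_cons, List.foldl_nil]
    rw [show (e : Int) + 1 - 1 = (e : Int) from by ring]
    exact ⟨_, _, rfl, hPB', K', hseg', hK2, hdead'⟩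

-- ===== VERDICT (by name: the statement is the Claim_ definition above) =====
theorem fuel_distro_spec : Claim_equal_fuel_distro := by
  intro fuel dist hdom hpre
  unfold Spec_fuel_distro
  obtain ⟨D, hEq, -⟩ := pvA_iter fuel dist (fuel.length : Int)
    ((PySem.List.pyRange 0 (fuel.length : Int) 1).foldl
      (fun dd i => dd.insert (i, i, i) (pvIdx fuel i)) PySem.Dict.empty)
    (pvInit_match fuel dist) fuel.length
  have hA : fuel_distro fuel dist = pvMtB fuel dist (fuel.length : Int) fuel.length := by
    simp only [fuel_distro]
    rw [pvFoldl_const]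
    rw [show (PySem.List.pyRange 0 ((fuel.length : Nat) : Int) 1).length = fuel.length from by
      simp [PySem.List.length_pyRange_one]]
    rw [hEq]
  obtain ⟨best, seg, hfold, hPB, K, hsegspec, hK, hdeads⟩ :=
    pvOuter fuel dist (fuel.length : Int) rfl fuel.length (le_refl _)
  have hB : fuel_distro_alt fuel dist = best := by
    simp only [fuel_distro_alt]
    rw [hfold]
  rw [hA, hB]
  refine pvIsBest_unique fuel dist (fuel.length : Int) fuel.length _ _
    (pvMtB_isBest fuel dist (fuel.length : Int) fuel.length) ?_
  obtain ⟨h1, hb, hw⟩ := hPB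
  refine ⟨h1, ?_, ?_⟩
  · intro r s hr hs hn ha
    refine hb r s hs hn ?_ ha
    by_cases hcase : s + (r : Int) ≤ (fuel.length : Int) - 1 - 1
    · exact Or.inl hcase
    · exact Or.inr ⟨by omega, by omega⟩
  · rcases hw with h | ⟨r, s, hs, hn, hreg, ha, he⟩
    · exact Or.inl h
    · refine Or.inr ⟨r, s, ?_, hs, hn, ha, he⟩
      have : (r : Int) < (fuel.length : Int) := by omega
      exact_mod_cast this.le
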